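-- pv_equiv track=rewrite | github.com/apcooley/grafty | grafty/utils.py | compute_line_byte_map
-- ===== SOURCE A (Python) =====
-- from typing import List, Tuple, Optional
--
-- def compute_line_byte_map(content: str) -> Tuple[List[int], List[int]]:
--     """
--     Compute line → byte offset and byte → line offset mappings.
--     Returns (line_starts, byte_to_line).
--     """
--     line_starts: List[int] = [0]
--     byte_to_line: List[int] = [0]
--
--     for i, char in enumerate(content):
--         byte_to_line.append(len(line_starts) - 1)
--         if char == "\n":
--             line_starts.append(i + 1)
--
--     return line_starts, byte_to_line
-- ===== SOURCE B (Python) =====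
-- def compute_line_byte_map(content):
--     """
--     Compute line -> byte offset and byte -> line offset mappings.
--     Returns (line_starts, byte_to_line).
--     """
--     n = len(content)
--     line_starts = [0] + [i + 1 for i, ch in enumerate(content) if ch == "\n"]
--     byte_to_line = [0]
--     for k in range(len(line_starts)):
--         end = line_starts[k + 1] if k + 1 < len(line_starts) else n
--         byte_to_line.extend([k] * (end - line_starts[k]))
--     return line_starts, byte_to_line
-- ===== Notes on version B (the rewrite author's own statement) =====
-- stated objective: alternative
-- what changed: Instead of one per-character pass that appends a line index per char and grows line_starts on newlines, B first indexes newline positions to get line_starts directly and then builds byte_to_line by run-length expansion per line.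
import Mathlib
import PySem

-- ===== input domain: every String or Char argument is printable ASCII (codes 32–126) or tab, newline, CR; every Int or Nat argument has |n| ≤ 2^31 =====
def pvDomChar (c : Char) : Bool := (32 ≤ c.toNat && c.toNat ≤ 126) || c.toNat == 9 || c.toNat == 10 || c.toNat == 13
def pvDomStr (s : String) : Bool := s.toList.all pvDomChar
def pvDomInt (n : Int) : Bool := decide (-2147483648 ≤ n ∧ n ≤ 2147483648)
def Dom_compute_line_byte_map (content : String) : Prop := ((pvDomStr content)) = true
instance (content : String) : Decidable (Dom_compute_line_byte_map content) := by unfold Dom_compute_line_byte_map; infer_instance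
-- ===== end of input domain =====

-- B replaces A's single per-character pass (which appends one line index per char and grows
-- line_starts on newlines) by a two-pass shape: index the newline positions to get line_starts
-- directly, then emit byte_to_line by run-length expansion per line (objective: alternative).

-- ===== PORT A =====
-- one pass: byte_to_line gets the current line index per char; line_starts grows on '\n'
def compute_line_byte_map (content : String) : List Int × List Int :=
  (PySem.List.enumerate content.toList 0).foldl
    (fun (st : List Int × List Int) (p : Int × Char) =>
      ( (if p.2 = '\n' then st.1 ++ [p.1 + 1] else st.1),
        st.2 ++ [(st.1.length : Int) - 1] ))
    ([0], [0])

-- ===== PORT B =====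
-- helper for B: the positions just after each newline ([i+1 for i, ch in enumerate(content) if ch == "\n"])
def pvNlStarts (cs : List Char) : List Int :=
  (PySem.List.enumerate cs 0).filterMap (fun p => if p.2 = '\n' then some (p.1 + 1) else none)

def compute_line_byte_map_alt (content : String) : List Int × List Int :=
  let cs := content.toList
  let n : Int := cs.length
  let line_starts : List Int := 0 :: pvNlStarts cs
  let byte_to_line : List Int :=
    (List.range line_starts.length).foldl
      (fun acc k =>
        acc ++ List.replicate
          (((if k + 1 < line_starts.length then line_starts.getD (k + 1) 0 else n)
            - line_starts.getD k 0).toNat) (k : Int))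
      [0]
  (line_starts, byte_to_line)

-- ===== PRECONDITION & SPEC =====
def Spec_compute_line_byte_map (content : String) (out : List Int × List Int) : Prop := out = compute_line_byte_map_alt content
instance (content : String) (out : List Int × List Int) : Decidable (Spec_compute_line_byte_map content out) := by unfold Spec_compute_line_byte_map; infer_instance

-- ===== CLAIM (what is proved, stated in full; the proofs are below) =====
def Claim_equal_compute_line_byte_map : Prop := ∀ (content : String), Dom_compute_line_byte_map content → Spec_compute_line_byte_map content (compute_line_byte_map content)

-- ===== LEMMAS AND PROOFS =====

-- byte_to_line tail in common terms: char i lies on line (number of newlines before i)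
def pvBtl (cs : List Char) : List Int :=
  (List.range cs.length).map (fun i => ((cs.take i).count '\n' : Int))

theorem pvNlStarts_append (cs : List Char) (c : Char) :
    pvNlStarts (cs ++ [c])
      = pvNlStarts cs ++ (if c = '\n' then [((cs.length : Int) + 1)] else []) := by
  by_cases h : c = '\n' <;>
    simp [pvNlStarts, PySem.List.enumerate_append, PySem.List.enumerate_cons,
      List.filterMap_append, h]

theorem pvNlStarts_length (cs : List Char) :
    (pvNlStarts cs).length = cs.count '\n' := by
  induction cs using List.reverseRecOn with
  | nil => simp [pvNlStarts]
  | append_singleton cs c ih =>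
      rw [pvNlStarts_append]
      split_ifs with h <;> simp [h, ih, List.count_append]

theorem pvNlStarts_bounds (cs : List Char) :
    ∀ x ∈ pvNlStarts cs, 0 ≤ x ∧ x ≤ (cs.length : Int) := by
  induction cs using List.reverseRecOn with
  | nil => simp [pvNlStarts]
  | append_singleton cs c ih =>
      intro x hx
      rw [pvNlStarts_append] at hx
      rcases List.mem_append.1 hx with h | h
      · have := ih x h; simp; omega
      · split_ifs at h <;> simp at h; simp [h]; omega

theorem pvBtl_append (cs : List Char) (c : Char) :
    pvBtl (cs ++ [c]) = pvBtl cs ++ [((cs.count '\n' : Int))] := by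
  simp [pvBtl, List.range_succ]
  intro i hi
  rw [List.take_append_of_le_length (le_of_lt hi)]

-- characterization of A's fold
theorem pvA_char (cs : List Char) :
    (PySem.List.enumerate cs 0).foldl
      (fun (st : List Int × List Int) (p : Int × Char) =>
        ( (if p.2 = '\n' then st.1 ++ [p.1 + 1] else st.1),
          st.2 ++ [(st.1.length : Int) - 1] ))
      ([0], [0])
    = (0 :: pvNlStarts cs, 0 :: pvBtl cs) := by
  induction cs using List.reverseRecOn with
  | nil => simp [pvNlStarts, pvBtl, PySem.List.enumerate_nil]
  | append_singleton cs c ih =>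
      rw [PySem.List.enumerate_append, List.foldl_append, ih]
      simp [PySem.List.enumerate_cons, pvNlStarts_append, pvBtl_append,
        pvNlStarts_length]
      split_ifs <;> simp

-- the run-length expansion over line_starts reproduces pvBtl
theorem pvRuns_eq (cs : List Char) :
    (List.range (0 :: pvNlStarts cs).length).flatMap
      (fun k => List.replicate
        (((if k + 1 < (0 :: pvNlStarts cs).length
            then (0 :: pvNlStarts cs).getD (k + 1) 0 else (cs.length : Int))
          - (0 :: pvNlStarts cs).getD k 0).toNat) (k : Int))
    = pvBtl cs := by
  induction cs using List.reverseRecOn with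
  | nil => simp [pvNlStarts, pvBtl, PySem.List.enumerate_nil]
  | append_singleton cs c ih =>
      have hlast : 0 ≤ (0 :: pvNlStarts cs).getD (pvNlStarts cs).length 0 ∧
          (0 :: pvNlStarts cs).getD (pvNlStarts cs).length 0 ≤ (cs.length : Int) := by
        have hmem : (0 :: pvNlStarts cs).getD (pvNlStarts cs).length 0 ∈ (0 :: pvNlStarts cs) := by
          rw [List.getD_eq_getElem _ _ (by simp)]
          exact List.getElem_mem _
        rcases List.mem_cons.1 hmem with h0 | h0
        · rw [h0]; constructor <;> simp
        · exact pvNlStarts_bounds cs _ h0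
      rw [show (0 :: pvNlStarts cs).length = (pvNlStarts cs).length + 1 from by simp,
        List.range_succ, List.flatMap_append, List.flatMap_cons, List.flatMap_nil,
        List.append_nil] at ih
      rw [if_neg (by omega)] at ih
      by_cases h : c = '\n'
      · -- a newline is appended: one more (empty-so-far) line starts at cs.length + 1
        have hnl : pvNlStarts (cs ++ [c]) = pvNlStarts cs ++ [(cs.length : Int) + 1] := by
          rw [pvNlStarts_append, if_pos h]
        rw [pvBtl_append, hnl]
        rw [show (0 :: (pvNlStarts cs ++ [(cs.length : Int) + 1])).length
              = (pvNlStarts cs).length + 1 + 1 from by simp]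
        rw [List.range_succ, List.range_succ, List.flatMap_append, List.flatMap_append,
          List.flatMap_cons, List.flatMap_nil, List.flatMap_cons, List.flatMap_nil,
          List.append_nil, List.append_nil]
        have hint : ∀ k ∈ List.range (pvNlStarts cs).length,
            List.replicate
              (((if k + 1 < (pvNlStarts cs).length + 1 + 1
                  then (0 :: (pvNlStarts cs ++ [(cs.length : Int) + 1])).getD (k + 1) 0
                  else ((cs ++ [c]).length : Int))
                - (0 :: (pvNlStarts cs ++ [(cs.length : Int) + 1])).getD k 0).toNat) (k : Int)
            = List.replicate
              (((if k + 1 < (pvNlStarts cs).length + 1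
                  then (0 :: pvNlStarts cs).getD (k + 1) 0 else (cs.length : Int))
                - (0 :: pvNlStarts cs).getD k 0).toNat) (k : Int) := by
          intro k hk
          have hk' := List.mem_range.1 hk
          rw [← List.cons_append]
          rw [List.getD_append _ _ _ _ (by simp; omega),
            List.getD_append _ _ _ _ (by simp; omega)]
          rw [if_pos (by omega), if_pos (by omega)]
        rw [List.flatMap_congr hint]
        -- the run of the line the newline ends grows by one entry
        have hrun : List.replicate
            (((if (pvNlStarts cs).length + 1 < (pvNlStarts cs).length + 1 + 1
                then (0 :: (pvNlStarts cs ++ [(cs.length : Int) + 1])).getD ((pvNlStarts cs).length + 1) 0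
                else ((cs ++ [c]).length : Int))
              - (0 :: (pvNlStarts cs ++ [(cs.length : Int) + 1])).getD (pvNlStarts cs).length 0).toNat)
              (((pvNlStarts cs).length : Int))
            = List.replicate
              (((cs.length : Int) - (0 :: pvNlStarts cs).getD (pvNlStarts cs).length 0).toNat)
              (((pvNlStarts cs).length : Int)) ++ [((pvNlStarts cs).length : Int)] := by
          rw [if_pos (by omega)]
          have h1 : (0 :: (pvNlStarts cs ++ [(cs.length : Int) + 1])).getD
              ((pvNlStarts cs).length + 1) 0 = (cs.length : Int) + 1 := by
            rw [← List.cons_append]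
            rw [List.getD_append_right _ _ _ _ (by simp)]
            simp
          have h2 : (0 :: (pvNlStarts cs ++ [(cs.length : Int) + 1])).getD
              (pvNlStarts cs).length 0 = (0 :: pvNlStarts cs).getD (pvNlStarts cs).length 0 := by
            rw [← List.cons_append]
            exact List.getD_append _ _ _ _ (by simp)
          rw [h1, h2]
          rw [show ((cs.length : Int) + 1 - (0 :: pvNlStarts cs).getD (pvNlStarts cs).length 0).toNat
                = ((cs.length : Int) - (0 :: pvNlStarts cs).getD (pvNlStarts cs).length 0).toNat + 1
              from by omega]
          rw [List.replicate_succ']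
        -- the freshly started line is empty so far: its run is empty
        have hzero : List.replicate
            (((if (pvNlStarts cs).length + 1 + 1 < (pvNlStarts cs).length + 1 + 1
                then (0 :: (pvNlStarts cs ++ [(cs.length : Int) + 1])).getD ((pvNlStarts cs).length + 1 + 1) 0
                else ((cs ++ [c]).length : Int))
              - (0 :: (pvNlStarts cs ++ [(cs.length : Int) + 1])).getD ((pvNlStarts cs).length + 1) 0).toNat)
            ((((pvNlStarts cs).length + 1 : Nat)) : Int) = [] := by
          rw [if_neg (by omega)]
          have h1 : (0 :: (pvNlStarts cs ++ [(cs.length : Int) + 1])).getD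
              ((pvNlStarts cs).length + 1) 0 = (cs.length : Int) + 1 := by
            rw [← List.cons_append]
            rw [List.getD_append_right _ _ _ _ (by simp)]
            simp
          rw [h1]
          simp
        rw [hrun, hzero, List.append_nil, ← List.append_assoc, ih, ← pvNlStarts_length]
      · -- no newline: line_starts is unchanged, the last run grows by one entry
        have hnl : pvNlStarts (cs ++ [c]) = pvNlStarts cs := by
          rw [pvNlStarts_append, if_neg h, List.append_nil]
        rw [pvBtl_append, hnl]
        rw [show (0 :: pvNlStarts cs).length = (pvNlStarts cs).length + 1 from by simp,
          List.range_succ, List.flatMap_append, List.flatMap_cons, List.flatMap_nil,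
          List.append_nil]
        have hint : ∀ k ∈ List.range (pvNlStarts cs).length,
            List.replicate
              (((if k + 1 < (pvNlStarts cs).length + 1
                  then (0 :: pvNlStarts cs).getD (k + 1) 0 else ((cs ++ [c]).length : Int))
                - (0 :: pvNlStarts cs).getD k 0).toNat) (k : Int)
            = List.replicate
              (((if k + 1 < (pvNlStarts cs).length + 1
                  then (0 :: pvNlStarts cs).getD (k + 1) 0 else (cs.length : Int))
                - (0 :: pvNlStarts cs).getD k 0).toNat) (k : Int) := by
          intro k hk
          have hk' := List.mem_range.1 hk
          rw [if_pos (by omega), if_pos (by omega)]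
        rw [List.flatMap_congr hint]
        have hrun : List.replicate
            (((if (pvNlStarts cs).length + 1 < (pvNlStarts cs).length + 1
                then (0 :: pvNlStarts cs).getD ((pvNlStarts cs).length + 1) 0
                else ((cs ++ [c]).length : Int))
              - (0 :: pvNlStarts cs).getD (pvNlStarts cs).length 0).toNat)
              (((pvNlStarts cs).length : Int))
            = List.replicate
              (((cs.length : Int) - (0 :: pvNlStarts cs).getD (pvNlStarts cs).length 0).toNat)
              (((pvNlStarts cs).length : Int)) ++ [((pvNlStarts cs).length : Int)] := by
          rw [if_neg (by omega)]
          have hlen : ((cs ++ [c]).length : Int) = (cs.length : Int) + 1 := by simp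
          rw [hlen]
          rw [show ((cs.length : Int) + 1 - (0 :: pvNlStarts cs).getD (pvNlStarts cs).length 0).toNat
                = ((cs.length : Int) - (0 :: pvNlStarts cs).getD (pvNlStarts cs).length 0).toNat + 1
              from by omega]
          rw [List.replicate_succ']
        rw [hrun, ← List.append_assoc, ih, ← pvNlStarts_length]

-- ===== VERDICT (by name: the statement is the Claim_ definition above) =====
theorem compute_line_byte_map_spec : Claim_equal_compute_line_byte_map := by
  intro content _
  unfold Spec_compute_line_byte_map compute_line_byte_map
  rw [pvA_char]
  simp only [compute_line_byte_map_alt]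
  rw [PySem.List.foldl_append_eq_flatMap, pvRuns_eq]
  simp
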